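-- pv_equiv track=rewrite | github.com/TomClarkJorvik/AdventOfCode2023 | Day 1/MyProgram.py | parseWordRecursion
-- ===== SOURCE A (Python) =====
-- def parseWordRecursion(line, lineIndex, word, wordIndex):
--     if (wordIndex < len(word)) and (lineIndex < len(line)):
--         if line[lineIndex] == word[wordIndex]:
--             if (wordIndex == (len(word)-1)):
--                 return True, word
--             else:
--                 return parseWordRecursion(line, lineIndex+1, word, wordIndex+1)
--     return False, ""
-- ===== SOURCE B (Python) =====
-- def parseWordRecursion(line, lineIndex, word, wordIndex):
--     n = len(word) - wordIndex          # characters still to match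
--     if n <= 0 or lineIndex >= len(line):
--         return False, ""
--     if lineIndex + n <= len(line) and all(
--             line[lineIndex + k] == word[wordIndex + k] for k in range(n)):
--         return True, word
--     return False, ""
-- ===== Notes on version B (the rewrite author's own statement) =====
-- stated objective: alternative
-- what changed: Replaces the one-char-per-call recursion by a closed-form length/bounds check plus a single all() scan over range(n): B first decides arithmetically whether the remaining word can fit, then compares the characters in one comprehension instead of recursing.
import Mathlib
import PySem

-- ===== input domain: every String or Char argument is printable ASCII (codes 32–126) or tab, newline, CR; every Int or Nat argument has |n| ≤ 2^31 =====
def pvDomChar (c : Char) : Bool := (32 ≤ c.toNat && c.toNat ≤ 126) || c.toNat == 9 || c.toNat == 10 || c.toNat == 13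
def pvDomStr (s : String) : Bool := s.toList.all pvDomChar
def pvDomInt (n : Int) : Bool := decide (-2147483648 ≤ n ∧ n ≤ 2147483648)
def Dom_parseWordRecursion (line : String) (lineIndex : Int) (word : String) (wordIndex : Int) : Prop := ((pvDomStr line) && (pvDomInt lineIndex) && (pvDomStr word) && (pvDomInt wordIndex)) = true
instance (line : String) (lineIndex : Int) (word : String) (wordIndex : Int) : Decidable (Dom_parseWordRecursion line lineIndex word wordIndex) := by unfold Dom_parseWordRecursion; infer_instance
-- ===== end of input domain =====

-- B replaces the one-char-per-call recursion by a closed-form bounds check plus one all() scan over range(n) (alternative decomposition, same cost).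

-- ===== PORT A =====
-- literal transliteration of A's recursion; the `| _, _` fall-through is Python's IndexError, excluded by Pre_
def parseWordRecursion (line : String) (lineIndex : Int) (word : String) (wordIndex : Int) : Bool × String :=
  if h : wordIndex < (PySem.Str.len word : Int) ∧ lineIndex < (PySem.Str.len line : Int) then
    match PySem.Str.pyGet? line lineIndex, PySem.Str.pyGet? word wordIndex with
    | some c, some d =>
      if c = d then
        if wordIndex = (PySem.Str.len word : Int) - 1 then (true, word)
        else parseWordRecursion line (lineIndex + 1) word (wordIndex + 1)
      else (false, "")
    | _, _ => (false, "")
  else (false, "")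
termination_by ((PySem.Str.len word : Int) - wordIndex).toNat
decreasing_by
  obtain ⟨h1, _⟩ := h
  simp only [PySem.Str.len] at *
  omega

-- ===== PORT B =====
-- transliteration of Source B: n = len(word) - wordIndex; the two early returns; then the all(...) over range(n)
def parseWordRecursion_alt (line : String) (lineIndex : Int) (word : String) (wordIndex : Int) : Bool × String :=
  let n : Int := (PySem.Str.len word : Int) - wordIndex
  if n ≤ 0 ∨ (PySem.Str.len line : Int) ≤ lineIndex then (false, "")
  else if lineIndex + n ≤ (PySem.Str.len line : Int) ∧
      (PySem.List.pyRange 0 n 1).all (fun k =>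
        decide (PySem.Str.pyGet? line (lineIndex + k) = PySem.Str.pyGet? word (wordIndex + k)))
    then (true, word)
  else (false, "")

-- ===== PRECONDITION & SPEC =====
-- Pre_ excludes exactly the inputs on which Python A raises IndexError: its guard passes but an index is below -len.
def Pre_parseWordRecursion (line : String) (lineIndex : Int) (word : String) (wordIndex : Int) : Prop :=
  (wordIndex < (PySem.Str.len word : Int) ∧ lineIndex < (PySem.Str.len line : Int)) →
    (-(PySem.Str.len line : Int) ≤ lineIndex ∧ -(PySem.Str.len word : Int) ≤ wordIndex)
instance (line : String) (lineIndex : Int) (word : String) (wordIndex : Int) : Decidable (Pre_parseWordRecursion line lineIndex word wordIndex) := by unfold Pre_parseWordRecursion; infer_instance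

def pvWitness_parseWordRecursion : String × Int × String × Int := ("abcde", 1, "bcd", 0)

def Spec_parseWordRecursion (line : String) (lineIndex : Int) (word : String) (wordIndex : Int) (out : Bool × String) : Prop := out = parseWordRecursion_alt line lineIndex word wordIndex
instance (line : String) (lineIndex : Int) (word : String) (wordIndex : Int) (out : Bool × String) : Decidable (Spec_parseWordRecursion line lineIndex word wordIndex out) := by unfold Spec_parseWordRecursion; infer_instance

-- ===== CLAIM (what is proved, stated in full; the proofs are below) =====
def Claim_equal_parseWordRecursion : Prop := ∀ (line : String) (lineIndex : Int) (word : String) (wordIndex : Int), Dom_parseWordRecursion line lineIndex word wordIndex → Pre_parseWordRecursion line lineIndex word wordIndex → Spec_parseWordRecursion line lineIndex word wordIndex (parseWordRecursion line lineIndex word wordIndex)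

-- ===== LEMMAS AND PROOFS =====

-- peel the k = 0 term off B's all(...) over range(n)
lemma all_range_split (f : Int → Bool) (n : Int) (hn : 0 < n) :
    (PySem.List.pyRange 0 n 1).all f
      = (f 0 && (PySem.List.pyRange 0 (n-1) 1).all (fun k => f (k+1))) := by
  rw [PySem.List.pyRange_one, PySem.List.pyRange_one]
  have h1 : (n - 0).toNat = (n - 1 - 0).toNat + 1 := by omega
  rw [h1, List.range_succ_eq_map]
  simp only [List.map_cons, List.all_cons, List.map_map, List.all_map]
  congr 1

theorem pwr_main (line word : String) : ∀ (m : Nat) (li wi : Int),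
    ((PySem.Str.len word : Int) - wi).toNat = m →
    Pre_parseWordRecursion line li word wi →
    parseWordRecursion line li word wi = parseWordRecursion_alt line li word wi := by
  intro m
  induction m using Nat.strong_induction_on with
  | _ m ih =>
    intro li wi hm hpre
    have hLW : PySem.Str.len word = (word.toList.length : Int) := PySem.Str.len_eq word
    have hLL : PySem.Str.len line = (line.toList.length : Int) := PySem.Str.len_eq line
    rw [parseWordRecursion]
    by_cases hg : wi < (PySem.Str.len word : Int) ∧ li < (PySem.Str.len line : Int)
    · obtain ⟨hw, hl⟩ := hg
      obtain ⟨hl2, hw2⟩ := hpre ⟨hw, hl⟩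
      have hlc : ∃ c, PySem.Str.pyGet? line li = some c := by
        simp only [PySem.Str.pyGet?, PySem.Chars.pyGet?]
        rcases h : PySem.List.pyGet? line.toList li with _ | c
        · rw [PySem.List.pyGet?_eq_none_iff] at h
          exact absurd ⟨by omega, by omega⟩ h
        · exact ⟨c, rfl⟩
      have hwc : ∃ d, PySem.Str.pyGet? word wi = some d := by
        simp only [PySem.Str.pyGet?, PySem.Chars.pyGet?]
        rcases h : PySem.List.pyGet? word.toList wi with _ | d
        · rw [PySem.List.pyGet?_eq_none_iff] at h
          exact absurd ⟨by omega, by omega⟩ h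
        · exact ⟨d, rfl⟩
      obtain ⟨c, hc⟩ := hlc
      obtain ⟨d, hd⟩ := hwc
      have hc' : PySem.List.pyGet? line.toList li = some c := hc
      have hd' : PySem.List.pyGet? word.toList wi = some d := hd
      rw [dif_pos ⟨hw, hl⟩, hc, hd]
      simp only []
      unfold parseWordRecursion_alt
      rw [if_neg (by omega :
        ¬((PySem.Str.len word - wi) ≤ 0 ∨ (PySem.Str.len line : Int) ≤ li))]
      by_cases hcd : c = d
      · subst hcd
        rw [if_pos rfl]
        by_cases hlast : wi = (PySem.Str.len word : Int) - 1
        · -- last character: n = 1 and the scan is just k = 0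
          rw [if_pos hlast, if_pos]
          refine ⟨by omega, ?_⟩
          have hn1 : PySem.Str.len word - wi = 1 := by omega
          rw [hn1, (by decide : PySem.List.pyRange 0 1 1 = [0])]
          simp [hc', hd']
        · -- recursive step
          rw [if_neg hlast]
          rw [ih ((PySem.Str.len word : Int) - (wi+1)).toNat (by omega) (li+1) (wi+1) rfl
              (fun _ => ⟨by omega, by omega⟩)]
          unfold parseWordRecursion_alt
          by_cases hl1 : (PySem.Str.len line : Int) ≤ li + 1
          · rw [if_pos (Or.inr hl1), if_neg]
            rintro ⟨hle, -⟩
            omega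
          · rw [if_neg (by omega :
              ¬((PySem.Str.len word - (wi+1)) ≤ 0 ∨ (PySem.Str.len line : Int) ≤ li + 1))]
            have hall : (PySem.List.pyRange 0 (PySem.Str.len word - wi) 1).all
                  (fun k => decide (PySem.Str.pyGet? line (li + k) = PySem.Str.pyGet? word (wi + k)))
                = (PySem.List.pyRange 0 (PySem.Str.len word - (wi+1)) 1).all
                  (fun k => decide (PySem.Str.pyGet? line (li + 1 + k) = PySem.Str.pyGet? word (wi + 1 + k))) := by
              rw [all_range_split _ _ (by omega : (0:Int) < PySem.Str.len word - wi)]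
              have h0 : decide (PySem.Str.pyGet? line (li + 0) = PySem.Str.pyGet? word (wi + 0)) = true := by
                simp [hc', hd']
              rw [h0, Bool.true_and,
                (by ring : PySem.Str.len word - wi - 1 = PySem.Str.len word - (wi+1))]
              refine List.all_congr rfl ?_
              intro k
              rw [(by ring : li + (k + 1) = li + 1 + k), (by ring : wi + (k + 1) = wi + 1 + k)]
            rw [(by ring : li + 1 + (PySem.Str.len word - (wi+1)) = li + (PySem.Str.len word - wi)),
              ← hall]
      · rw [if_neg hcd, if_neg]
        rintro ⟨-, hall⟩
        rw [all_range_split _ _ (by omega : (0:Int) < PySem.Str.len word - wi)] at hall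
        simp [hc', hd', hcd] at hall
    · rw [dif_neg hg]
      unfold parseWordRecursion_alt
      rw [if_pos (show (PySem.Str.len word : Int) - wi ≤ 0 ∨ (PySem.Str.len line : Int) ≤ li by omega)]

-- ===== VERDICT (by name: the statement is the Claim_ definition above) =====
theorem parseWordRecursion_spec : Claim_equal_parseWordRecursion := by
  intro line li word wi _ hpre
  unfold Spec_parseWordRecursion
  exact pwr_main line word _ li wi rfl hpre
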